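-- pv_equiv track=rewrite | github.com/zacamantea/journeymap-rcon-grid-scan | rcon_tp.py | generate_spiral_points
-- ===== SOURCE A (Python) =====
-- def generate_spiral_points(step: int, radius: int):
--     n = radius // step
--     points = [(0, 0)]
--
--     for k in range(1, n + 1):
--         x = k
--         z = k - 1
--
--         z += 1
--         points.append((x, z))
--
--         for _ in range(2 * k):
--             x -= 1
--             points.append((x, z))
--
--         for _ in range(2 * k):
--             z -= 1
--             points.append((x, z))
--
--         for _ in range(2 * k):
--             x += 1
--             points.append((x, z))
--
--         for _ in range(2 * k - 1):
--             z += 1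
--             points.append((x, z))
--
--     world_points = []
--     for gx, gz in points:
--         wx = gx * step
--         wz = gz * step
--         if -radius <= wx <= radius and -radius <= wz <= radius:
--             world_points.append((wx, wz))
--
--     seen = set()
--     ordered = []
--     for p in world_points:
--         if p not in seen:
--             seen.add(p)
--             ordered.append(p)
--
--     return ordered
-- ===== SOURCE B (Python) =====
-- def _cell(k, t):
--     # t-th point (CCW from the top-right corner) of the ring max(|x|,|z|) == k
--     if t <= 2 * k:
--         return (k - t, k)
--     elif t <= 4 * k:
--         return (-k, 3 * k - t)
--     elif t <= 6 * k:
--         return (t - 5 * k, -k)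
--     else:
--         return (k, t - 7 * k)
--
--
-- def generate_spiral_points(step: int, radius: int):
--     n = radius // step
--     pts = [(0, 0)] + [_cell(k, t) for k in range(1, n + 1) for t in range(8 * k)]
--     return [(gx * step, gz * step) for gx, gz in pts
--             if -radius <= gx * step <= radius and -radius <= gz * step <= radius]
-- ===== Notes on version B (the rewrite author's own statement) =====
-- stated objective: simpler
-- what changed: B replaces A's incremental four-leg spiral walk (mutable x/z stepping by one), the separate bounds-filter pass and the seen-set dedup pass by a closed-form perimeter formula cell(k,t) mapped over ring indices plus one filtering comprehension; the dedup pass is dropped because the spiral never repeats a cell (proved).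
import Mathlib
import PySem

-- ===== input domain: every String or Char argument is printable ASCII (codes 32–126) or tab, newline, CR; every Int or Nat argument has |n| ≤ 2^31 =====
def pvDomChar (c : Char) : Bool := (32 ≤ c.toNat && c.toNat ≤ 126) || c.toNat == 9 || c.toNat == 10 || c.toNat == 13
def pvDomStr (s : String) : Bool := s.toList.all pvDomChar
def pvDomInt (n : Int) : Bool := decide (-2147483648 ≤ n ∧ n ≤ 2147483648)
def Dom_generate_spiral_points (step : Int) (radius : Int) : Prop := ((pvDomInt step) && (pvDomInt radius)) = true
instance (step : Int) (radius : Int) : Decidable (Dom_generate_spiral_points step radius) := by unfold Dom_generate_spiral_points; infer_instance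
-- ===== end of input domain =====

-- B replaces A's incremental spiral walk, the separate bounds-filter pass and the no-op
-- seen-set dedup pass by one closed-form perimeter formula mapped over ring indices and a
-- single filtering comprehension (simpler).

-- ===== PORT A =====
-- loop body of A's `for k in range(1, n + 1)` (mutable x, z walked by ±1; points appended)
def gspA_ring (points : List (Int × Int)) (k : Int) : List (Int × Int) :=
  let x := k
  let z := k - 1
  let z := z + 1
  let points := points ++ [(x, z)]
  let s := (PySem.List.pyRange 0 (2 * k) 1).foldl
    (fun (s : Int × Int × List (Int × Int)) _ =>
      (s.1 - 1, s.2.1, s.2.2 ++ [(s.1 - 1, s.2.1)])) (x, z, points)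
  let s := (PySem.List.pyRange 0 (2 * k) 1).foldl
    (fun (s : Int × Int × List (Int × Int)) _ =>
      (s.1, s.2.1 - 1, s.2.2 ++ [(s.1, s.2.1 - 1)])) s
  let s := (PySem.List.pyRange 0 (2 * k) 1).foldl
    (fun (s : Int × Int × List (Int × Int)) _ =>
      (s.1 + 1, s.2.1, s.2.2 ++ [(s.1 + 1, s.2.1)])) s
  let s := (PySem.List.pyRange 0 (2 * k - 1) 1).foldl
    (fun (s : Int × Int × List (Int × Int)) _ =>
      (s.1, s.2.1 + 1, s.2.2 ++ [(s.1, s.2.1 + 1)])) s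
  s.2.2

def generate_spiral_points (step : Int) (radius : Int) : List (Int × Int) :=
  let n := PySem.Int.floordiv radius step
  let points := (PySem.List.pyRange 1 (n + 1) 1).foldl gspA_ring [((0 : Int), (0 : Int))]
  let world_points := points.foldl (fun acc p =>
    let wx := p.1 * step
    let wz := p.2 * step
    if -radius ≤ wx ∧ wx ≤ radius ∧ -radius ≤ wz ∧ wz ≤ radius then acc ++ [(wx, wz)]
    else acc) []
  let res := world_points.foldl
    (fun (st : PySem.Set (Int × Int) × List (Int × Int)) p =>
      if PySem.Set.contains st.1 p then st else (PySem.Set.add st.1 p, st.2 ++ [p]))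
    (PySem.Set.empty, [])
  res.2

-- ===== PORT B =====
-- t-th point (CCW from the top-right corner) of the ring max(|x|,|z|) = k
def gsp_cell (k t : Int) : Int × Int :=
  if t ≤ 2 * k then (k - t, k)
  else if t ≤ 4 * k then (-k, 3 * k - t)
  else if t ≤ 6 * k then (t - 5 * k, -k)
  else (k, t - 7 * k)

def generate_spiral_points_alt (step : Int) (radius : Int) : List (Int × Int) :=
  let n := PySem.Int.floordiv radius step
  let pts := ((0 : Int), (0 : Int)) ::
    (PySem.List.pyRange 1 (n + 1) 1).flatMap (fun k =>
      (PySem.List.pyRange 0 (8 * k) 1).map (gsp_cell k))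
  pts.filterMap (fun p =>
    if -radius ≤ p.1 * step ∧ p.1 * step ≤ radius ∧ -radius ≤ p.2 * step ∧ p.2 * step ≤ radius
    then some (p.1 * step, p.2 * step) else none)

-- ===== PRECONDITION & SPEC =====
-- Python's A raises ZeroDivisionError on radius // step when step = 0 (B raises there too)
def Pre_generate_spiral_points (step : Int) (radius : Int) : Prop := step ≠ 0
instance (step : Int) (radius : Int) : Decidable (Pre_generate_spiral_points step radius) := by
  unfold Pre_generate_spiral_points; infer_instance

def pvWitness_generate_spiral_points : Int × Int := (1, 3)

def Spec_generate_spiral_points (step : Int) (radius : Int) (out : List (Int × Int)) : Prop := out = generate_spiral_points_alt step radius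
instance (step : Int) (radius : Int) (out : List (Int × Int)) : Decidable (Spec_generate_spiral_points step radius out) := by unfold Spec_generate_spiral_points; infer_instance

-- ===== CLAIM (what is proved, stated in full; the proofs are below) =====
def Claim_equal_generate_spiral_points : Prop := ∀ (step : Int) (radius : Int), Dom_generate_spiral_points step radius → Pre_generate_spiral_points step radius → Spec_generate_spiral_points step radius (generate_spiral_points step radius)

-- ===== LEMMAS AND PROOFS =====

-- the four walking legs of A's ring loop, in closed form
lemma gsp_leg_W : ∀ (l : List Int) (x z : Int) (pts : List (Int × Int)),
    l.foldl (fun (s : Int × Int × List (Int × Int)) _ =>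
      (s.1 - 1, s.2.1, s.2.2 ++ [(s.1 - 1, s.2.1)])) (x, z, pts)
    = (x - l.length, z,
       pts ++ (List.range l.length).map (fun i : Nat => (x - ((i : Int) + 1), z))) := by
  intro l
  induction l with
  | nil => intro x z pts; simp
  | cons a l ih =>
    intro x z pts
    simp only [List.foldl_cons]
    rw [ih]
    simp only [List.length_cons, Prod.mk.injEq]
    refine ⟨by push_cast; ring, trivial, ?_⟩
    rw [List.append_assoc]
    congr 1
    rw [List.range_succ_eq_map, List.map_cons, List.map_map, List.singleton_append]
    refine congrArg₂ List.cons (by norm_num) (List.map_congr_left ?_)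
    intro i hi
    simp only [Function.comp_apply, Prod.mk.injEq]
    exact ⟨by push_cast; ring, trivial⟩

lemma gsp_leg_S : ∀ (l : List Int) (x z : Int) (pts : List (Int × Int)),
    l.foldl (fun (s : Int × Int × List (Int × Int)) _ =>
      (s.1, s.2.1 - 1, s.2.2 ++ [(s.1, s.2.1 - 1)])) (x, z, pts)
    = (x, z - l.length,
       pts ++ (List.range l.length).map (fun i : Nat => (x, z - ((i : Int) + 1)))) := by
  intro l
  induction l with
  | nil => intro x z pts; simp
  | cons a l ih =>
    intro x z pts
    simp only [List.foldl_cons]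
    rw [ih]
    simp only [List.length_cons, Prod.mk.injEq]
    refine ⟨trivial, by push_cast; ring, ?_⟩
    rw [List.append_assoc]
    congr 1
    rw [List.range_succ_eq_map, List.map_cons, List.map_map, List.singleton_append]
    refine congrArg₂ List.cons (by norm_num) (List.map_congr_left ?_)
    intro i hi
    simp only [Function.comp_apply, Prod.mk.injEq]
    exact ⟨trivial, by push_cast; ring⟩

lemma gsp_leg_E : ∀ (l : List Int) (x z : Int) (pts : List (Int × Int)),
    l.foldl (fun (s : Int × Int × List (Int × Int)) _ =>
      (s.1 + 1, s.2.1, s.2.2 ++ [(s.1 + 1, s.2.1)])) (x, z, pts)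
    = (x + l.length, z,
       pts ++ (List.range l.length).map (fun i : Nat => (x + ((i : Int) + 1), z))) := by
  intro l
  induction l with
  | nil => intro x z pts; simp
  | cons a l ih =>
    intro x z pts
    simp only [List.foldl_cons]
    rw [ih]
    simp only [List.length_cons, Prod.mk.injEq]
    refine ⟨by push_cast; ring, trivial, ?_⟩
    rw [List.append_assoc]
    congr 1
    rw [List.range_succ_eq_map, List.map_cons, List.map_map, List.singleton_append]
    refine congrArg₂ List.cons (by norm_num) (List.map_congr_left ?_)
    intro i hi
    simp only [Function.comp_apply, Prod.mk.injEq]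
    exact ⟨by push_cast; ring, trivial⟩

lemma gsp_leg_N : ∀ (l : List Int) (x z : Int) (pts : List (Int × Int)),
    l.foldl (fun (s : Int × Int × List (Int × Int)) _ =>
      (s.1, s.2.1 + 1, s.2.2 ++ [(s.1, s.2.1 + 1)])) (x, z, pts)
    = (x, z + l.length,
       pts ++ (List.range l.length).map (fun i : Nat => (x, z + ((i : Int) + 1)))) := by
  intro l
  induction l with
  | nil => intro x z pts; simp
  | cons a l ih =>
    intro x z pts
    simp only [List.foldl_cons]
    rw [ih]
    simp only [List.length_cons, Prod.mk.injEq]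
    refine ⟨trivial, by push_cast; ring, ?_⟩
    rw [List.append_assoc]
    congr 1
    rw [List.range_succ_eq_map, List.map_cons, List.map_map, List.singleton_append]
    refine congrArg₂ List.cons (by norm_num) (List.map_congr_left ?_)
    intro i hi
    simp only [Function.comp_apply, Prod.mk.injEq]
    exact ⟨trivial, by push_cast; ring⟩

-- A's ring body equals B's closed-form ring
lemma gspA_ring_eq (pts : List (Int × Int)) (k : Int) (hk : 1 ≤ k) :
    gspA_ring pts k = pts ++ (PySem.List.pyRange 0 (8 * k) 1).map (gsp_cell k) := by
  obtain ⟨a, rfl⟩ : ∃ a : Nat, (a : Int) = k := ⟨k.toNat, by omega⟩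
  have ha : 1 ≤ a := by exact_mod_cast hk
  simp only [gspA_ring]
  rw [gsp_leg_W, gsp_leg_S, gsp_leg_E, gsp_leg_N]
  simp only [PySem.List.length_pyRange_one]
  have h2 : ((2 * (a : Int)) - 0).toNat = 2 * a := by omega
  have h21 : ((2 * (a : Int) - 1) - 0).toNat = 2 * a - 1 := by omega
  rw [h2, h21]
  rw [PySem.List.pyRange_one, List.map_map]
  have h8 : ((8 * (a : Int)) - 0).toNat = 8 * a := by omega
  rw [h8]
  have hsplit : 8 * a = 1 + 2 * a + 2 * a + 2 * a + (2 * a - 1) := by omega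
  rw [hsplit, List.range_add, List.range_add, List.range_add, List.range_add]
  simp only [List.map_append, List.map_map, List.range_one, List.map_cons, List.map_nil,
    List.append_assoc, List.singleton_append]
  congr 1
  refine congrArg₂ List.cons ?_ (congrArg₂ (· ++ ·) (List.map_congr_left (by
      intro i hi
      rw [List.mem_range] at hi
      simp only [Function.comp_apply, gsp_cell]
      split_ifs <;> simp only [Prod.mk.injEq] <;> push_cast at * <;> omega)) (congrArg₂ (· ++ ·) (List.map_congr_left (by
      intro i hi
      rw [List.mem_range] at hi
      simp only [Function.comp_apply, gsp_cell]
      split_ifs <;> simp only [Prod.mk.injEq] <;> push_cast at * <;> omega))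
    (congrArg₂ (· ++ ·) (List.map_congr_left (by
      intro i hi
      rw [List.mem_range] at hi
      simp only [Function.comp_apply, gsp_cell]
      split_ifs <;> simp only [Prod.mk.injEq] <;> push_cast at * <;> omega)) (List.map_congr_left (by
      intro i hi
      rw [List.mem_range] at hi
      simp only [Function.comp_apply, gsp_cell]
      split_ifs <;> simp only [Prod.mk.injEq] <;> push_cast at * <;> omega)))))
  · simp only [Function.comp_apply, gsp_cell]
    rw [if_pos (by push_cast; omega)]
    simp only [Prod.mk.injEq]
    constructor <;> push_cast <;> omega

-- the two spiral point lists coincide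
lemma gsp_points_eq (n : Int) :
    (PySem.List.pyRange 1 (n + 1) 1).foldl gspA_ring [((0 : Int), (0 : Int))]
    = ((0 : Int), (0 : Int)) ::
      (PySem.List.pyRange 1 (n + 1) 1).flatMap (fun k =>
        (PySem.List.pyRange 0 (8 * k) 1).map (gsp_cell k)) := by
  have h : ∀ (acc : List (Int × Int)) (k : Int), k ∈ PySem.List.pyRange 1 (n + 1) 1 →
      gspA_ring acc k = acc ++ (PySem.List.pyRange 0 (8 * k) 1).map (gsp_cell k) :=
    fun acc k hm => gspA_ring_eq acc k (PySem.List.mem_pyRange_one.mp hm).1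
  refine Eq.trans (PySem.List.foldl_congr_mem _ _ _ _ h) ?_
  refine Eq.trans (PySem.List.foldl_append_eq_flatMap _ _ _) ?_
  rfl

-- every ring cell has Chebyshev norm k
lemma gsp_cell_norm (k t : Int) (hk : 1 ≤ k) (h0 : 0 ≤ t) (h8 : t < 8 * k) :
    max (gsp_cell k t).1.natAbs (gsp_cell k t).2.natAbs = k.toNat := by
  unfold gsp_cell; split_ifs <;> simp <;> omega

-- within a ring the cells are pairwise distinct
lemma gsp_cell_inj (k t₁ t₂ : Int) (hk : 1 ≤ k)
    (h1 : 0 ≤ t₁) (h1' : t₁ < 8 * k) (h2 : 0 ≤ t₂) (h2' : t₂ < 8 * k)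
    (h : gsp_cell k t₁ = gsp_cell k t₂) : t₁ = t₂ := by
  unfold gsp_cell at h; split_ifs at h <;> simp [Prod.ext_iff] at h <;> omega

-- each ring, as a list, is duplicate-free
lemma gsp_ring_nodup (k : Int) (hk : 1 ≤ k) :
    ((PySem.List.pyRange 0 (8 * k) 1).map (gsp_cell k)).Nodup := by
  refine List.Nodup.map_on ?_ (PySem.List.nodup_pyRange_one 0 (8 * k))
  intro t1 ht1 t2 ht2 heq
  rw [PySem.List.mem_pyRange_one] at ht1 ht2
  exact gsp_cell_inj k t1 t2 hk ht1.1 ht1.2 ht2.1 ht2.2 heq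

-- the whole spiral list is duplicate-free
lemma gsp_pts_nodup (n : Int) :
    (((0 : Int), (0 : Int)) ::
      (PySem.List.pyRange 1 (n + 1) 1).flatMap (fun k =>
        (PySem.List.pyRange 0 (8 * k) 1).map (gsp_cell k))).Nodup := by
  rw [List.nodup_cons]
  constructor
  · intro hmem
    rw [List.mem_flatMap] at hmem
    obtain ⟨k, hk, hp⟩ := hmem
    rw [List.mem_map] at hp
    obtain ⟨t, ht, hcell⟩ := hp
    rw [PySem.List.mem_pyRange_one] at hk ht
    have hnorm := gsp_cell_norm k t hk.1 ht.1 ht.2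
    rw [hcell] at hnorm
    simp at hnorm
    omega
  · rw [List.nodup_flatMap]
    refine ⟨fun k hk => gsp_ring_nodup k (PySem.List.mem_pyRange_one.mp hk).1, ?_⟩
    refine List.Pairwise.imp ?_ (PySem.List.pairwise_lt_pyRange_one 1 (n + 1))
    intro k1 k2 hlt
    intro p hp1 hp2
    rw [List.mem_map] at hp1 hp2
    obtain ⟨t1, ht1, hc1⟩ := hp1
    obtain ⟨t2, ht2, hc2⟩ := hp2
    rw [PySem.List.mem_pyRange_one] at ht1 ht2
    have hk1 : 1 ≤ k1 := by omega
    have hk2 : 1 ≤ k2 := by omega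
    have h1 := gsp_cell_norm k1 t1 hk1 ht1.1 ht1.2
    have h2 := gsp_cell_norm k2 t2 hk2 ht2.1 ht2.2
    rw [hc1] at h1
    rw [hc2] at h2
    omega

-- the comprehension `[f p for p in l if P p]` as filter-then-map
lemma gsp_filterMap_if {P : Int × Int → Prop} [DecidablePred P] (f : Int × Int → Int × Int) :
    ∀ l : List (Int × Int),
      l.filterMap (fun p => if P p then some (f p) else none)
      = (l.filter (fun p => decide (P p))).map f := by
  intro l
  induction l with
  | nil => simp
  | cons p l ih => by_cases h : P p <;> simp [h, ih]

-- the dedup loop is the identity on a duplicate-free list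
lemma gsp_dedup_fold : ∀ (l : List (Int × Int)) (s : PySem.Set (Int × Int)) (acc : List (Int × Int)),
    l.Nodup → (∀ x ∈ l, x ∉ s) →
    (l.foldl (fun (st : PySem.Set (Int × Int) × List (Int × Int)) p =>
      if PySem.Set.contains st.1 p then st else (PySem.Set.add st.1 p, st.2 ++ [p])) (s, acc)).2
    = acc ++ l := by
  intro l
  induction l with
  | nil => intro s acc _ _; simp
  | cons p l ih =>
    intro s acc hnd hs
    rw [List.foldl_cons]
    have hc : ¬ (PySem.Set.contains s p = true) := by
      rw [PySem.Set.contains_iff]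
      exact hs p (by simp)
    rw [if_neg hc]
    rw [ih (PySem.Set.add s p) (acc ++ [p]) (List.nodup_cons.mp hnd).2 ?_]
    · simp
    · intro x hx
      rw [PySem.Set.mem_add]
      rintro (h | h)
      · exact hs x (List.mem_cons_of_mem _ hx) h
      · exact (List.nodup_cons.mp hnd).1 (h ▸ hx)

-- ===== VERDICT (by name: the statement is the Claim_ definition above) =====
theorem generate_spiral_points_spec : Claim_equal_generate_spiral_points := by
  intro step radius _ hpre
  unfold Pre_generate_spiral_points at hpre
  unfold Spec_generate_spiral_points
  simp only [generate_spiral_points, generate_spiral_points_alt]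
  rw [gsp_points_eq]
  rw [PySem.List.foldl_append_ite
    (p := fun p : Int × Int =>
      -radius ≤ p.1 * step ∧ p.1 * step ≤ radius ∧ -radius ≤ p.2 * step ∧ p.2 * step ≤ radius)
    (f := fun p : Int × Int => (p.1 * step, p.2 * step))]
  rw [gsp_filterMap_if]
  have hnd : ((((0 : Int), (0 : Int)) ::
      (PySem.List.pyRange 1 (PySem.Int.floordiv radius step + 1) 1).flatMap (fun k =>
        (PySem.List.pyRange 0 (8 * k) 1).map (gsp_cell k))).filter
      (fun p : Int × Int => decide
        (-radius ≤ p.1 * step ∧ p.1 * step ≤ radius ∧ -radius ≤ p.2 * step ∧ p.2 * step ≤ radius))).Nodup :=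
    (gsp_pts_nodup (PySem.Int.floordiv radius step)).filter _
  rw [gsp_dedup_fold _ PySem.Set.empty [] ?_ ?_]
  · simp
  · refine List.Nodup.map_on ?_ hnd
    intro p _ q _ h
    rw [Prod.mk.injEq] at h
    rw [Prod.ext_iff]
    exact ⟨mul_right_cancel₀ hpre h.1, mul_right_cancel₀ hpre h.2⟩
  · intro x _
    simp [PySem.Set.empty]
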